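-- pv_equiv track=rewrite | github.com/jointavbench/JointAVBench | evaluation/utils.py | clean_subtitles
-- ===== SOURCE A (Python) =====
-- def clean_subtitles(subtitles, max_repeats=2):
--     if not subtitles:
--         return subtitles
--
--     cleaned_subtitles = []
--     i = 0
--     n = len(subtitles)
--
--     while i < n:
--         current_text = subtitles[i]['text']
--         j = i + 1
--
--         # 找出连续重复的句子
--         while j < n and subtitles[j]['text'] == current_text:
--             j += 1
--
--         repeat_count = j - i
--
--         # 如果重复次数不超过最大允许次数，保留这些句子
--         if repeat_count <= max_repeats:
--             cleaned_subtitles.extend(subtitles[i:j])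
--         # 否则，跳过所有重复的句子
--
--         i = j  # 移动到下一组不同的句子
--
--     # 保留的ASCII字符过滤（原功能保持不变）
--     filtered_subtitles = []
--     for subtitle in cleaned_subtitles:
--         text = subtitle['text']
--         if all(ord(char) < 128 for char in text):
--             filtered_subtitles.append(subtitle)
--
--     return filtered_subtitles
-- ===== SOURCE B (Python) =====
-- def clean_subtitles(subtitles, max_repeats=2):
--     if not subtitles:
--         return subtitles
--
--     # label each entry with the id of the maximal consecutive equal-text run it belongs to
--     rid = [0]
--     for prev, cur in zip(subtitles, subtitles[1:]):
--         rid.append(rid[-1] + (cur['text'] != prev['text']))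
--
--     # tally run sizes by run id
--     counts = [0] * (rid[-1] + 1)
--     for r in rid:
--         counts[r] += 1
--
--     # keep the entries whose run is small enough and whose text is pure ASCII
--     return [s for r, s in zip(rid, subtitles)
--             if counts[r] <= max_repeats and all(ord(c) < 128 for c in s['text'])]
-- ===== Notes on version B (the rewrite author's own statement) =====
-- stated objective: alternative
-- what changed: Instead of grouping/flushing runs, B labels every entry with a run id via pairwise comparison of neighbours, tallies run sizes into a count table indexed by run id, and selects entries by a single comprehension testing counts[rid] <= max_repeats and ASCII-ness; no run accumulation or slicing occurs.
import Mathlib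
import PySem

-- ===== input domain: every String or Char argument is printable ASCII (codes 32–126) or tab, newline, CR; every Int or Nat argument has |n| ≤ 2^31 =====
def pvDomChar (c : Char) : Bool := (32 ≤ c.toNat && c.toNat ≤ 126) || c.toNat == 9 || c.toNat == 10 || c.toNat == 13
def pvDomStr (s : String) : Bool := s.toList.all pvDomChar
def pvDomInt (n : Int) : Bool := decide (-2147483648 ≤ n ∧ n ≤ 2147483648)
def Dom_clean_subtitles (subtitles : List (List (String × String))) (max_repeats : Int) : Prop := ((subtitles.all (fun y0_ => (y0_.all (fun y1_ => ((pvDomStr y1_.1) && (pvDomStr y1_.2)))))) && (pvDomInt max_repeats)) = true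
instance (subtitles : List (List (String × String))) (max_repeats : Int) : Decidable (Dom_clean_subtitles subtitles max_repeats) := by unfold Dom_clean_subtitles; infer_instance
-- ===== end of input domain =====

-- B replaces A's grouping loops by a run-id labelling pass, a run-size tally table and a
-- single selection comprehension; genuinely different decomposition, same O(n) cost.

-- ===== PORT A =====

-- s['text'] : first value stored under "text"; exact when the key is present (Pre_ requires it)
def pvText (s : List (String × String)) : String :=
  ((s.find? (fun p => p.1 == "text")).map (·.2)).getD ""

-- all(ord(char) < 128 for char in text)
def pvAscii (t : String) : Bool := t.toList.all (fun c => c.toNat < 128)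

-- inner while: 'while j < n and subtitles[j]['text'] == current_text: j += 1'
def pvScan (subs : List (List (String × String))) (n : Nat) (cur : String) (j : Nat) : Nat :=
  if h : j < n then
    if pvText (subs.getD j []) = cur then pvScan subs n cur (j + 1) else j
  else j
termination_by n - j

def pvScan_ge (subs : List (List (String × String))) (n : Nat) (cur : String) (j : Nat) :
    j ≤ pvScan subs n cur j := by
  fun_induction pvScan with
  | case1 j h heq ih => omega
  | case2 => omega
  | case3 => omega

-- outer while over i, accumulating cleaned_subtitles
def pvCleanLoop (subs : List (List (String × String))) (n : Nat) (max_repeats : Int)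
    (acc : List (List (String × String))) (i : Nat) : List (List (String × String)) :=
  if h : i < n then
    let cur := pvText (subs.getD i [])
    let j := pvScan subs n cur (i + 1)
    let acc' := if ((j : Int) - (i : Int)) ≤ max_repeats
                then acc ++ (subs.drop i).take (j - i)   -- subtitles[i:j], indices in range
                else acc
    pvCleanLoop subs n max_repeats acc' j
  else acc
termination_by n - i
decreasing_by
  have := pvScan_ge subs n (pvText (subs.getD i [])) (i + 1); omega

def clean_subtitles (subtitles : List (List (String × String))) (max_repeats : Int) :
    List (List (String × String)) :=
  if subtitles = [] then subtitles
  else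
    let cleaned := pvCleanLoop subtitles subtitles.length max_repeats [] 0
    cleaned.foldl (fun acc s => if pvAscii (pvText s) then acc ++ [s] else acc) []

-- ===== PORT B =====

-- rid.append(rid[-1] + (cur['text'] != prev['text'])), over zip(subtitles, subtitles[1:])
def pvRidStep (rid : List Nat) (p : (List (String × String)) × (List (String × String))) :
    List Nat :=
  rid ++ [rid.getLast! + (if pvText p.2 ≠ pvText p.1 then 1 else 0)]

def pvRid (subs : List (List (String × String))) : List Nat :=
  (subs.zip (subs.drop 1)).foldl pvRidStep [0]

-- counts = [0] * (rid[-1] + 1); for r in rid: counts[r] += 1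
def pvCounts (rid : List Nat) : List Int :=
  rid.foldl (fun counts r => counts.modify r (· + 1)) (List.replicate (rid.getLast! + 1) 0)

def clean_subtitles_alt (subtitles : List (List (String × String))) (max_repeats : Int) :
    List (List (String × String)) :=
  if subtitles = [] then subtitles
  else
    let rid := pvRid subtitles
    let counts := pvCounts rid
    ((rid.zip subtitles).filter
        (fun p => decide (counts.getD p.1 0 ≤ max_repeats) && pvAscii (pvText p.2))).map
      Prod.snd

-- ===== PRECONDITION & SPEC =====
-- Pre_ excludes inputs where some subtitle dict has no "text" key: there A raises KeyError.
def Pre_clean_subtitles (subtitles : List (List (String × String))) (max_repeats : Int) : Prop :=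
  ∀ s ∈ subtitles, (s.find? (fun p => p.1 == "text")).isSome

instance (subtitles : List (List (String × String))) (max_repeats : Int) :
    Decidable (Pre_clean_subtitles subtitles max_repeats) := by
  unfold Pre_clean_subtitles; infer_instance

def pvWitness_clean_subtitles : (List (List (String × String))) × Int :=
  ([[("text", "hi")], [("text", "hi")], [("text", "hi")], [("text", "yo")]], 2)

def Spec_clean_subtitles (subtitles : List (List (String × String))) (max_repeats : Int)
    (out : List (List (String × String))) : Prop :=
  out = clean_subtitles_alt subtitles max_repeats

instance (subtitles : List (List (String × String))) (max_repeats : Int)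
    (out : List (List (String × String))) : Decidable (Spec_clean_subtitles subtitles max_repeats out) := by
  unfold Spec_clean_subtitles; infer_instance

-- ===== CLAIM (what is proved, stated in full; the proofs are below) =====
def Claim_equal_clean_subtitles : Prop := ∀ (subtitles : List (List (String × String))) (max_repeats : Int), Dom_clean_subtitles subtitles max_repeats → Pre_clean_subtitles subtitles max_repeats → Spec_clean_subtitles subtitles max_repeats (clean_subtitles subtitles max_repeats)

-- ===== LEMMAS AND PROOFS =====

-- canonical description of the result: runs of equal text, each kept iff short, ASCII-filtered
def pvSpecRuns (max_repeats : Int) : List (List (String × String)) → List (List (String × String))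
  | [] => []
  | s :: rest =>
    let p := fun x => pvText x = pvText s
    let tw := rest.takeWhile p
    (if ((1 + tw.length : Int)) ≤ max_repeats
     then (s :: tw).filter (fun x => pvAscii (pvText x)) else [])
      ++ pvSpecRuns max_repeats (rest.dropWhile p)
termination_by l => l.length
decreasing_by
  simp only [List.length_cons]
  exact Nat.lt_succ_of_le (List.length_dropWhile_le _ _)

theorem pvScan_eq_takeWhile (subs : List (List (String × String))) (cur : String) (j : Nat) :
    pvScan subs subs.length cur j
      = j + ((subs.drop j).takeWhile (fun x => pvText x = cur)).length := by
  fun_induction pvScan with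
  | case1 j h ht ih =>
      have hd : subs.drop j = subs.getD j [] :: subs.drop (j + 1) := by
        rw [List.getD_eq_getElem _ _ h, List.drop_eq_getElem_cons h]
      rw [hd, List.takeWhile_cons]; simp only [ht, decide_true, if_true, List.length_cons, ih]; omega
  | case2 j h ht =>
      have hd : subs.drop j = subs.getD j [] :: subs.drop (j + 1) := by
        rw [List.getD_eq_getElem _ _ h, List.drop_eq_getElem_cons h]
      rw [hd, List.takeWhile_cons]
      simp only [ht, decide_false, Bool.false_eq_true, if_false, List.length_nil]
      omega
  | case3 j h =>
      have : subs.drop j = [] := List.drop_eq_nil_of_le (by omega)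
      simp [this]

theorem take_takeWhile_length {α : Type} (p : α → Bool) (l : List α) :
    l.take (l.takeWhile p).length = l.takeWhile p := by
  induction l with
  | nil => rfl
  | cons x xs ih =>
      rw [List.takeWhile_cons]
      by_cases h : p x <;> simp [h, ih]

theorem drop_takeWhile_length {α : Type} (p : α → Bool) (l : List α) :
    l.drop (l.takeWhile p).length = l.dropWhile p := by
  induction l with
  | nil => rfl
  | cons x xs ih =>
      rw [List.takeWhile_cons, List.dropWhile_cons]
      by_cases h : p x <;> simp [h, ih]

theorem pvSpecRuns_cons (mr : Int) (s : List (String × String))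
    (rest : List (List (String × String))) :
    pvSpecRuns mr (s :: rest)
      = (if ((1 + ((rest.takeWhile (fun x => pvText x = pvText s)).length : Int))) ≤ mr
         then (s :: rest.takeWhile (fun x => pvText x = pvText s)).filter
                (fun x => pvAscii (pvText x))
         else [])
        ++ pvSpecRuns mr (rest.dropWhile (fun x => pvText x = pvText s)) := by
  rw [pvSpecRuns]

-- A's cleaning loop followed by the ASCII filter = acc filtered ++ pvSpecRuns of the suffix
theorem pvCleanLoop_filter (subs : List (List (String × String))) (max_repeats : Int)
    (acc : List (List (String × String))) (i : Nat) :
    (pvCleanLoop subs subs.length max_repeats acc i).filter (fun s => pvAscii (pvText s))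
      = acc.filter (fun s => pvAscii (pvText s)) ++ pvSpecRuns max_repeats (subs.drop i) := by
  fun_induction pvCleanLoop with
  | case1 acc i h cur j acc' ih =>
      have hd : subs.drop i = subs.getD i [] :: subs.drop (i + 1) := by
        rw [List.getD_eq_getElem _ _ h, List.drop_eq_getElem_cons h]
      have hj : j = i + 1 + ((subs.drop (i+1)).takeWhile (fun x => pvText x = cur)).length :=
        pvScan_eq_takeWhile subs cur (i + 1)
      set tw := (subs.drop (i+1)).takeWhile (fun x => pvText x = cur) with htw
      have hcur : pvText (subs.getD i []) = cur := rfl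
      have htwfull : (subs.drop i).takeWhile (fun x => pvText x = cur)
          = subs.getD i [] :: tw := by
        rw [hd, List.takeWhile_cons]
        simp only [hcur, decide_true, if_true, htw]
      have htake : (subs.drop i).take (j - i) = subs.getD i [] :: tw := by
        have hlen : j - i = ((subs.drop i).takeWhile (fun x => pvText x = cur)).length := by
          rw [htwfull, List.length_cons]; omega
        rw [hlen, take_takeWhile_length]; exact htwfull
      have hdropj : subs.drop j = (subs.drop (i+1)).dropWhile (fun x => pvText x = cur) := by
        have h1 : subs.drop j = (subs.drop (i+1)).drop tw.length := by
          rw [List.drop_drop]; congr 1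
        rw [h1, htw, drop_takeWhile_length]
      have hcond : (((j : Int) - (i : Int)) ≤ max_repeats)
          ↔ ((1 + (tw.length : Int)) ≤ max_repeats) := by
        constructor <;> intro hx <;> omega
      rw [ih]
      simp only [acc']
      rw [htake, hdropj, hd, pvSpecRuns_cons, hcur, ← htw]
      by_cases hc : ((j : Int) - (i : Int)) ≤ max_repeats
      · rw [dif_pos hc, if_pos (hcond.mp hc)]
        simp [List.filter_append, List.append_assoc]
      · rw [dif_neg hc, if_neg (fun hx => hc (hcond.mpr hx))]
        simp
  | case2 acc i h =>
      have : subs.drop i = [] := List.drop_eq_nil_of_le (by omega)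
      simp [this, pvSpecRuns]

-- ===== B-side lemmas =====

-- clean recursion computing the run-id labels: ridAux c a l = labels of a :: l starting at id c
def ridAux (c : Nat) (a : List (String × String)) :
    List (List (String × String)) → List Nat
  | [] => [c]
  | b :: r => c :: ridAux (c + (if pvText b ≠ pvText a then 1 else 0)) b r

theorem ridAux_head_cons (c : Nat) (a : List (String × String))
    (l : List (List (String × String))) :
    ridAux c a l = c :: (ridAux c a l).tail := by
  cases l <;> rfl

-- the last! of a list, as getLast?.getD
theorem pvGetLast!_eq (l : List Nat) : l.getLast! = l.getLast?.getD 0 := by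
  cases l with
  | nil => rfl
  | cons a t => simp [List.getLast!, List.getLast?_eq_some_getLast (l := a :: t) (by simp)]

theorem pvRid_foldl (l : List (List (String × String))) :
    ∀ (x : List (String × String)) (acc : List Nat) (c : Nat),
      acc ≠ [] → acc.getLast! = c →
      ((x :: l).zip l).foldl pvRidStep acc = acc ++ (ridAux c x l).tail := by
  induction l with
  | nil => intro x acc c _ _; simp [ridAux]
  | cons b r ih =>
      intro x acc c hne hl
      have hstep : pvRidStep acc (x, b)
          = acc ++ [c + (if pvText b ≠ pvText x then 1 else 0)] := by
        simp only [pvRidStep]; rw [hl]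
      simp only [List.zip_cons_cons, List.foldl_cons, hstep]
      rw [ih b (acc ++ [c + (if pvText b ≠ pvText x then 1 else 0)])
          (c + (if pvText b ≠ pvText x then 1 else 0)) (by simp) (by simp)]
      rw [show ridAux c x (b :: r)
            = c :: ridAux (c + (if pvText b ≠ pvText x then 1 else 0)) b r from rfl]
      rw [ridAux_head_cons (c + (if pvText b ≠ pvText x then 1 else 0)) b r]
      simp

theorem pvRid_eq_ridAux (a : List (String × String)) (rest : List (List (String × String))) :
    pvRid (a :: rest) = ridAux 0 a rest := by
  unfold pvRid
  simp only [List.drop_succ_cons, List.drop_zero]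
  rw [pvRid_foldl rest a [0] 0 (by simp) (by simp)]
  rw [ridAux_head_cons 0 a rest]
  simp

-- shift lemma: starting id c+1 just adds one to every label
theorem ridAux_shift (l : List (List (String × String))) :
    ∀ (c : Nat) (a : List (String × String)),
      ridAux (c + 1) a l = (ridAux c a l).map (· + 1) := by
  induction l with
  | nil => intro c a; simp [ridAux]
  | cons b r ih =>
      intro c a
      simp only [ridAux, List.map_cons]
      rw [Nat.add_right_comm c 1 (if pvText b ≠ pvText a then 1 else 0),
        ih (c + (if pvText b ≠ pvText a then 1 else 0)) b]

-- run decomposition of the labels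
theorem ridAux_decomp (rest : List (List (String × String))) :
    ∀ (c : Nat) (a : List (String × String)),
      ridAux c a rest
        = List.replicate (1 + (rest.takeWhile (fun x => pvText x = pvText a)).length) c
            ++ (match rest.dropWhile (fun x => pvText x = pvText a) with
                | [] => []
                | b :: r => ridAux (c + 1) b r) := by
  induction rest with
  | nil => intro c a; simp [ridAux]
  | cons b r ih =>
      intro c a
      by_cases hb : pvText b = pvText a
      · have hp : (fun x => decide (pvText x = pvText a)) = (fun x => decide (pvText x = pvText b)) := by
          funext x; rw [hb]
        have h1 : ridAux c a (b :: r) = c :: ridAux c b r := by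
          simp [ridAux, hb]
        rw [h1, List.takeWhile_cons, List.dropWhile_cons]
        simp only [hp, hb, decide_true, if_true]
        rw [ih c b, List.length_cons]
        set L := (List.takeWhile (fun x => decide (pvText x = pvText b)) r).length with hL
        have h2 : 1 + (L + 1) = 1 + (1 + L) := by omega
        rw [h2, List.replicate_add 1 (1 + L) c]
        simp
      · have h1 : ridAux c a (b :: r) = c :: ridAux (c + 1) b r := by
          simp [ridAux, hb]
        rw [h1, List.takeWhile_cons, List.dropWhile_cons]
        simp [hb]

-- labels are bounded by the last label
theorem ridAux_bounds (l : List (List (String × String))) :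
    ∀ (c : Nat) (a : List (String × String)) (x : Nat), x ∈ ridAux c a l →
      c ≤ x ∧ x ≤ (ridAux c a l).getLast! := by
  induction l with
  | nil =>
      intro c a x hx
      simp [ridAux] at hx
      simp [hx, ridAux, pvGetLast!_eq]
  | cons b r ih =>
      intro c a x hx
      have hrw : ridAux c a (b :: r)
          = c :: ridAux (c + (if pvText b ≠ pvText a then 1 else 0)) b r := rfl
      set c' := c + (if pvText b ≠ pvText a then 1 else 0) with hc'
      have hcc' : c ≤ c' := by omega
      have htail : ridAux c' b r = c' :: (ridAux c' b r).tail := ridAux_head_cons c' b r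
      have hlast : (ridAux c a (b :: r)).getLast! = (ridAux c' b r).getLast! := by
        rw [hrw, pvGetLast!_eq, pvGetLast!_eq, htail, List.getLast?_cons_cons]
      have hhead : c' ≤ (ridAux c' b r).getLast! := by
        have := ih c' b c' (by rw [htail]; exact List.mem_cons_self)
        exact this.2
      rw [hrw] at hx
      rcases List.mem_cons.mp hx with h1 | h1
      · subst h1; rw [hlast]; exact ⟨le_refl _, le_trans hcc' hhead⟩
      · have := ih c' b x h1
        rw [hlast]; exact ⟨le_trans hcc' this.1, this.2⟩

-- the count table really counts occurrences
theorem counts_foldl (l : List Nat) :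
    ∀ (cs : List Int) (i : Nat), (∀ r ∈ l, r < cs.length) →
      (l.foldl (fun cs r => cs.modify r (· + 1)) cs).getD i 0
        = cs.getD i 0 + (l.count i : Int) := by
  induction l with
  | nil => intro cs i _; simp
  | cons r rest ih =>
      intro cs i h
      have hr : r < cs.length := h r List.mem_cons_self
      simp only [List.foldl_cons]
      rw [ih (cs.modify r (· + 1)) i
            (by intro q hq; rw [List.length_modify]; exact h q (List.mem_cons_of_mem _ hq))]
      have hmod : (cs.modify r (· + 1)).getD i 0
          = cs.getD i 0 + (if r = i then (1 : Int) else 0) := by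
        rw [List.getD_eq_getElem?_getD, List.getD_eq_getElem?_getD, List.getElem?_modify]
        by_cases hir : r = i
        · subst hir
          have : cs[r]? = some cs[r] := List.getElem?_eq_getElem hr
          simp [this]
        · simp [hir]
      rw [hmod, List.count_cons]
      by_cases hir : r = i <;> simp [hir] <;> push_cast <;> ring

theorem pvCounts_spec (rid : List Nat) (h : ∀ x ∈ rid, x ≤ rid.getLast!) (i : Nat) :
    (pvCounts rid).getD i 0 = (rid.count i : Int) := by
  unfold pvCounts
  rw [counts_foldl rid (List.replicate (rid.getLast! + 1) 0) i
      (by intro q hq; rw [List.length_replicate]; exact Nat.lt_succ_of_le (h q hq))]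
  have hrep : (List.replicate (rid.getLast! + 1) (0 : Int)).getD i 0 = 0 := by
    rw [List.getD_eq_getElem?_getD, List.getElem?_replicate]
    split <;> rfl
  rw [hrep, zero_add]

-- zip of a replicate with a list of the same length
theorem zip_replicate_self {α : Type} (c : Nat) (ys : List α) :
    (List.replicate ys.length c).zip ys = ys.map (fun y => (c, y)) := by
  induction ys with
  | nil => rfl
  | cons y t ih => simp [List.replicate_succ, ih]

-- every label of a shifted tail is positive
theorem count_zero_map_succ (l : List Nat) : (l.map (· + 1)).count 0 = 0 := by
  rw [List.count_eq_zero]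
  intro hmem
  rcases List.mem_map.mp hmem with ⟨x, _, hx⟩
  omega

-- reduced forms of the label decomposition
theorem ridAux_decomp_nil (c : Nat) (a : List (String × String))
    (rest : List (List (String × String)))
    (h : rest.dropWhile (fun x => decide (pvText x = pvText a)) = []) :
    ridAux c a rest
      = List.replicate (1 + (rest.takeWhile (fun x => decide (pvText x = pvText a))).length) c := by
  rw [ridAux_decomp rest c a, h]
  simp

theorem ridAux_decomp_cons (c : Nat) (a : List (String × String))
    (rest : List (List (String × String))) (b : List (String × String))
    (r : List (List (String × String)))
    (h : rest.dropWhile (fun x => decide (pvText x = pvText a)) = b :: r) :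
    ridAux c a rest
      = List.replicate (1 + (rest.takeWhile (fun x => decide (pvText x = pvText a))).length) c
          ++ ridAux (c + 1) b r := by
  rw [ridAux_decomp rest c a, h]

-- B on a nonempty list, with the branch resolved
theorem alt_cons (mr : Int) (a : List (String × String))
    (rest : List (List (String × String))) :
    clean_subtitles_alt (a :: rest) mr
      = (((pvRid (a :: rest)).zip (a :: rest)).filter
          (fun p => decide ((pvCounts (pvRid (a :: rest))).getD p.1 0 ≤ mr)
            && pvAscii (pvText p.2))).map Prod.snd := by
  unfold clean_subtitles_alt
  rw [if_neg (List.cons_ne_nil a rest)]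

-- B computes pvSpecRuns on nonempty input
theorem pvAlt_eq_specRuns (max_repeats : Int) :
    ∀ (subs : List (List (String × String))), subs ≠ [] →
      clean_subtitles_alt subs max_repeats = pvSpecRuns max_repeats subs := by
  intro subs
  induction subs using pvSpecRuns.induct with
  | case1 => intro h; exact absurd rfl h
  | case2 a rest p ih =>
      intro _
      cases hdw : rest.dropWhile (fun x => decide (pvText x = pvText a)) with
      | nil =>
          have hrest : rest.takeWhile (fun x => decide (pvText x = pvText a)) = rest := by
            have h2 := List.takeWhile_append_dropWhile
              (p := fun x => decide (pvText x = pvText a)) (l := rest)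
            rw [hdw, List.append_nil] at h2; exact h2
          have hrid : pvRid (a :: rest) = List.replicate (1 + rest.length) 0 := by
            rw [pvRid_eq_ridAux, ridAux_decomp_nil 0 a rest hdw, hrest]
          have hcnt : (pvCounts (List.replicate (1 + rest.length) 0)).getD 0 0
              = ((1 + rest.length : Nat) : Int) := by
            rw [pvCounts_spec _ (fun x hx => by
                rcases List.eq_of_mem_replicate hx with rfl; omega) 0,
              List.count_replicate]
            simp
          rw [alt_cons, hrid]
          rw [show List.replicate (1 + rest.length) (0 : Nat)
                = List.replicate ((a :: rest).length) 0 from by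
              rw [List.length_cons]; congr 1; omega]
          rw [zip_replicate_self, List.filter_map, List.map_map]
          rw [pvSpecRuns_cons, hdw]
          rw [show pvSpecRuns max_repeats [] = [] from by rw [pvSpecRuns], List.append_nil, hrest]
          by_cases hc : ((1 + rest.length : Nat) : Int) ≤ max_repeats
          · rw [if_pos (by push_cast at hc ⊢; omega :
                ((1 : Int) + (rest.length : Int)) ≤ max_repeats)]
            rw [List.filter_congr (fun y _ => by
              show ((fun p => decide ((pvCounts (List.replicate ((a :: rest).length) 0)).getD p.1 0 ≤ max_repeats)
                    && pvAscii (pvText p.2)) ∘ (fun y => ((0 : Nat), y))) y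
                  = pvAscii (pvText y)
              rw [show List.replicate ((a :: rest).length) (0 : Nat)
                    = List.replicate (1 + rest.length) 0 from by
                  rw [List.length_cons]; congr 1; omega]
              simp [Function.comp, ← List.getD_eq_getElem?_getD, hcnt]
              intro _
              push_cast at hc ⊢
              omega)]
            simp
          · rw [if_neg (by push_cast at hc ⊢; omega :
                ¬ ((1 : Int) + (rest.length : Int)) ≤ max_repeats)]
            rw [List.filter_congr (fun y _ => by
              show ((fun p => decide ((pvCounts (List.replicate ((a :: rest).length) 0)).getD p.1 0 ≤ max_repeats)
                    && pvAscii (pvText p.2)) ∘ (fun y => ((0 : Nat), y))) y = false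
              rw [show List.replicate ((a :: rest).length) (0 : Nat)
                    = List.replicate (1 + rest.length) 0 from by
                  rw [List.length_cons]; congr 1; omega]
              simp [Function.comp, ← List.getD_eq_getElem?_getD, hcnt]
              intro hx
              exfalso
              push_cast at hc hx
              omega)]
            simp
      | cons b r =>
          have hrid : pvRid (a :: rest)
              = List.replicate (1 + (rest.takeWhile (fun x => decide (pvText x = pvText a))).length) 0
                  ++ (pvRid (b :: r)).map (· + 1) := by
            rw [pvRid_eq_ridAux, ridAux_decomp_cons 0 a rest b r hdw, ridAux_shift r 0 b,
              ← pvRid_eq_ridAux]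
          have hbound : ∀ x ∈ pvRid (a :: rest), x ≤ (pvRid (a :: rest)).getLast! := by
            rw [pvRid_eq_ridAux]; intro x hx; exact (ridAux_bounds rest 0 a x hx).2
          have hbound' : ∀ x ∈ pvRid (b :: r), x ≤ (pvRid (b :: r)).getLast! := by
            rw [pvRid_eq_ridAux]; intro x hx; exact (ridAux_bounds r 0 b x hx).2
          have hcount0 : (pvRid (a :: rest)).count 0
              = 1 + (rest.takeWhile (fun x => decide (pvText x = pvText a))).length := by
            rw [hrid, List.count_append, List.count_replicate, count_zero_map_succ]
            simp
          have hcountS : ∀ i : Nat,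
              (pvRid (a :: rest)).count (i + 1) = (pvRid (b :: r)).count i := by
            intro i
            rw [hrid, List.count_append, List.count_replicate,
              List.count_map_of_injective (pvRid (b :: r)) (· + 1) (fun x y h => by simpa using h) i]
            simp
          have hc0 : (pvCounts (pvRid (a :: rest))).getD 0 0
              = ((1 + (rest.takeWhile (fun x => decide (pvText x = pvText a))).length : Nat) : Int) := by
            rw [pvCounts_spec _ hbound 0, hcount0]
          have hcS : ∀ i : Nat, (pvCounts (pvRid (a :: rest))).getD (i + 1) 0
              = (pvCounts (pvRid (b :: r))).getD i 0 := by
            intro i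
            rw [pvCounts_spec _ hbound (i + 1), hcountS i, pvCounts_spec _ hbound' i]
          have hsubs : a :: rest
              = (a :: rest.takeWhile (fun x => decide (pvText x = pvText a))) ++ (b :: r) := by
            have h2 := List.takeWhile_append_dropWhile
              (p := fun x => decide (pvText x = pvText a)) (l := rest)
            rw [hdw] at h2
            conv_lhs => rw [← h2]
            rfl
          have hzip : (pvRid (a :: rest)).zip (a :: rest)
              = ((a :: rest.takeWhile (fun x => decide (pvText x = pvText a))).map
                  (fun y => ((0 : Nat), y)))
                ++ ((pvRid (b :: r)).zip (b :: r)).map (Prod.map (· + 1) id) := by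
            conv_lhs => rw [hrid, hsubs]
            rw [List.zip_append (by rw [List.length_replicate, List.length_cons]; omega),
              List.zip_map_left]
            congr 1
            rw [show List.replicate (1 + (rest.takeWhile (fun x => decide (pvText x = pvText a))).length) (0 : Nat)
                  = List.replicate ((a :: rest.takeWhile (fun x => decide (pvText x = pvText a))).length) 0 from by
                rw [List.length_cons]; congr 1; omega]
            exact zip_replicate_self 0 _
          rw [alt_cons, hzip, List.filter_append, List.map_append,
            List.filter_map, List.filter_map, List.map_map, List.map_map]
          rw [pvSpecRuns_cons, hdw]
          congr 1
          -- first half: the leading run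
          · by_cases hc : ((1 + (rest.takeWhile (fun x => decide (pvText x = pvText a))).length : Nat) : Int) ≤ max_repeats
            · rw [if_pos (by push_cast at hc ⊢; omega :
                  ((1 : Int) + ((rest.takeWhile (fun x => decide (pvText x = pvText a))).length : Int)) ≤ max_repeats)]
              rw [List.filter_congr (fun y _ => by
                show ((fun p => decide ((pvCounts (pvRid (a :: rest))).getD p.1 0 ≤ max_repeats)
                      && pvAscii (pvText p.2)) ∘ (fun y => ((0 : Nat), y))) y
                    = pvAscii (pvText y)
                simp [Function.comp, ← List.getD_eq_getElem?_getD, hc0]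
                intro _
                push_cast at hc ⊢
                omega)]
              simp
            · rw [if_neg (by push_cast at hc ⊢; omega :
                  ¬ ((1 : Int) + ((rest.takeWhile (fun x => decide (pvText x = pvText a))).length : Int)) ≤ max_repeats)]
              rw [List.filter_congr (fun y _ => by
                show ((fun p => decide ((pvCounts (pvRid (a :: rest))).getD p.1 0 ≤ max_repeats)
                      && pvAscii (pvText p.2)) ∘ (fun y => ((0 : Nat), y))) y = false
                simp [Function.comp, ← List.getD_eq_getElem?_getD, hc0]
                intro hx
                exfalso
                push_cast at hc hx
                omega)]
              simp
          -- second half: equals B on the tail, then the IH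
          · rw [List.filter_congr (fun q _ => by
                show ((fun p => decide ((pvCounts (pvRid (a :: rest))).getD p.1 0 ≤ max_repeats)
                      && pvAscii (pvText p.2)) ∘ Prod.map (· + 1) id) q
                    = (decide ((pvCounts (pvRid (b :: r))).getD q.1 0 ≤ max_repeats)
                      && pvAscii (pvText q.2))
                simp [Function.comp, ← List.getD_eq_getElem?_getD, Prod.map, hcS q.1])]
            rw [List.map_congr_left (fun q _ => by
                show (Prod.snd ∘ Prod.map (· + 1) id) q = Prod.snd q
                rfl)]
            rw [← alt_cons]
            have ih' := ih
            simp only [show p = (fun x => pvText x = pvText a) from rfl] at ih'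
            rw [hdw] at ih'
            exact ih' (List.cons_ne_nil b r)

-- ===== VERDICT (by name: the statement is the Claim_ definition above) =====
theorem clean_subtitles_spec : Claim_equal_clean_subtitles := by
  intro subtitles max_repeats _hdom _hpre
  unfold Spec_clean_subtitles
  cases subtitles with
  | nil => rfl
  | cons s rest =>
      unfold clean_subtitles
      simp only [if_neg (List.cons_ne_nil s rest)]
      rw [PySem.List.foldl_append_if_eq_filter, List.nil_append,
        pvCleanLoop_filter, List.filter_nil, List.drop_zero, List.nil_append,
        pvAlt_eq_specRuns max_repeats _ (List.cons_ne_nil s rest)]
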